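-- pv_equiv track=rewrite | github.com/Elgolfin/adventofcode-2015-py | day01_lib.py | walk_through_floors
-- ===== SOURCE A (Python) =====
-- def walk_through_floors(instructions):
--     """Returns the final floor and the position that causes to first enter the basement"""
--     floor = 0
--     position = 0
--     enter_basement_at = 0
--     for instruction in instructions:
--         position += 1
--         if instruction == '(':
--             floor += 1
--         else:
--             floor -= 1
--         if floor == -1 and enter_basement_at == 0:
--             enter_basement_at = position
--     return floor, enter_basement_at
-- ===== SOURCE B (Python) =====
-- def walk_through_floors(instructions):
--     """Returns the final floor and the position that causes to first enter the basement"""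
--     floor = 2 * sum(c == '(' for c in instructions) - len(instructions)
--     enter_basement_at = 0
--     depth = 0
--     for i, c in enumerate(instructions):
--         depth += 1 if c == '(' else -1
--         if depth == -1:
--             enter_basement_at = i + 1
--             break
--     return floor, enter_basement_at
-- ===== Notes on version B (the rewrite author's own statement) =====
-- stated objective: alternative
-- what changed: A computes floor and basement position in one fused loop carrying three state variables; B decomposes it into a closed-form final floor (twice the count of up-steps minus the length) and a separate early-exit scan for the first basement entry.
import Mathlib
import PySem

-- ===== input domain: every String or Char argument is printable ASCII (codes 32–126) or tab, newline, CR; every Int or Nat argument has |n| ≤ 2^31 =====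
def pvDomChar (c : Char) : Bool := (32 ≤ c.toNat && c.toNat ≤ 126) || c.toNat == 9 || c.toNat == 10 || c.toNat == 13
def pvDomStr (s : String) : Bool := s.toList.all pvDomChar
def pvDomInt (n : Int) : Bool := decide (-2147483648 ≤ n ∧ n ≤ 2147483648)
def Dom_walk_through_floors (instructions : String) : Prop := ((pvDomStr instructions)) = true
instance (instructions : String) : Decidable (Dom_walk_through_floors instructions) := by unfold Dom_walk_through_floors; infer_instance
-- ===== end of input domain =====

-- B replaces A's fused three-variable loop by a closed-form floor plus a separate early-exit basement scan (objective: alternative decomposition).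

-- ===== PORT A =====
-- A's loop body, one step per instruction character (state = (floor, position, enter_basement_at))
def wtfStepA (st : Int × Int × Int) (instruction : Char) : Int × Int × Int :=
  let position := st.2.1 + 1
  let floor := if instruction = '(' then st.1 + 1 else st.1 - 1
  let enter_basement_at := if floor = -1 ∧ st.2.2 = 0 then position else st.2.2
  (floor, position, enter_basement_at)

def walk_through_floors (instructions : String) : Int × Int :=
  let r := instructions.toList.foldl wtfStepA (0, 0, 0)
  (r.1, r.2.2)

-- ===== PORT B =====
-- B's early-exit scan: first position (1-based, base index i) where the running depth hits -1, else 0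
def wtfBasementScan : List Char → Int → Int → Int
  | [], _, _ => 0
  | c :: rest, depth, i =>
    let depth' := depth + (if c = '(' then 1 else -1)
    if depth' = -1 then i + 1 else wtfBasementScan rest depth' (i + 1)

def walk_through_floors_alt (instructions : String) : Int × Int :=
  let l := instructions.toList
  let floor : Int := 2 * (l.map (fun c => if c = '(' then (1 : Int) else 0)).sum - l.length
  (floor, wtfBasementScan l 0 0)

-- ===== PRECONDITION & SPEC =====
def Spec_walk_through_floors (instructions : String) (out : Int × Int) : Prop := out = walk_through_floors_alt instructions
instance (instructions : String) (out : Int × Int) : Decidable (Spec_walk_through_floors instructions out) := by unfold Spec_walk_through_floors; infer_instance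

-- ===== CLAIM (what is proved, stated in full; the proofs are below) =====
def Claim_equal_walk_through_floors : Prop := ∀ (instructions : String), Dom_walk_through_floors instructions → Spec_walk_through_floors instructions (walk_through_floors instructions)

-- ===== LEMMAS AND PROOFS =====

lemma wtf_fold_floor (l : List Char) : ∀ (f p e : Int),
    (l.foldl wtfStepA (f, p, e)).1
      = f + 2 * (l.map (fun c => if c = '(' then (1 : Int) else 0)).sum - l.length := by
  induction l with
  | nil => intro f p e; simp
  | cons c rest ih =>
    intro f p e
    simp only [List.foldl_cons, List.map_cons, List.sum_cons, List.length_cons, wtfStepA]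
    rw [ih]
    split_ifs <;> push_cast <;> ring

lemma wtf_fold_eb_ne (l : List Char) : ∀ (f p e : Int), e ≠ 0 →
    (l.foldl wtfStepA (f, p, e)).2.2 = e := by
  induction l with
  | nil => intro f p e _; rfl
  | cons c rest ih =>
    intro f p e he
    simp only [List.foldl_cons, wtfStepA, he, and_false, if_false]
    exact ih _ _ _ he

lemma wtf_fold_eb_zero (l : List Char) : ∀ (f p : Int), 0 ≤ p →
    (l.foldl wtfStepA (f, p, 0)).2.2 = wtfBasementScan l f p := by
  induction l with
  | nil => intro f p _; rfl
  | cons c rest ih =>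
    intro f p hp
    rw [List.foldl_cons]
    have hstep : (if c = '(' then f + 1 else f - 1) = f + (if c = '(' then (1 : Int) else -1) := by
      split_ifs <;> ring
    by_cases hneg : f + (if c = '(' then (1 : Int) else -1) = -1
    · have hA : wtfStepA (f, p, 0) c = (f + (if c = '(' then 1 else -1), p + 1, p + 1) := by
        simp only [wtfStepA, hstep, hneg]; simp
      rw [hA, wtf_fold_eb_ne rest _ _ _ (by omega : p + 1 ≠ 0)]
      simp only [wtfBasementScan, hneg, if_true]
    · have hA : wtfStepA (f, p, 0) c = (f + (if c = '(' then 1 else -1), p + 1, 0) := by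
        simp only [wtfStepA, hstep, hneg]; simp
      rw [hA, ih _ _ (by omega)]
      simp only [wtfBasementScan, hneg, if_false]

-- ===== VERDICT (by name: the statement is the Claim_ definition above) =====
theorem walk_through_floors_spec : Claim_equal_walk_through_floors := by
  intro s _
  show _ = _
  unfold walk_through_floors walk_through_floors_alt
  refine Prod.ext ?_ ?_
  · simpa using wtf_fold_floor s.toList 0 0 0
  · simpa using wtf_fold_eb_zero s.toList 0 0 le_rfl
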